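-- pv_equiv track=rewrite | github.com/Mohammad-Faisal/algorithm-problem-solutions | KARAT/snakes_on_a_plane.py | findPassableLanes
-- ===== SOURCE A (Python) =====
-- def findPassableLanes(board):
--     rows =[]
--     cols=[]
--     for row in range(len(board)):
--         clear = True;
--         for val in board[row]:
--             if(val == '+'):
--                 clear = False
--                 break
--         if clear:
--             rows.append(row)
--
--     for j in range(len(board[0])):
--         clear = True
--         for i in range(len(board)):
--             if(board[i][j] == '+'):
--                 clear = False
--                 break
--         if clear:
--             cols.append(j)
--     return [rows,cols]
-- ===== SOURCE B (Python) =====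
-- def findPassableLanes(board):
--     # Single cell-marking pass: record every row/column index that holds a '+',
--     # then return the complements.
--     bad_rows = set()
--     bad_cols = set()
--     for i, row in enumerate(board):
--         for j, val in enumerate(row):
--             if val == '+':
--                 bad_rows.add(i)
--                 bad_cols.add(j)
--     rows = [i for i in range(len(board)) if i not in bad_rows]
--     cols = [j for j in range(len(board[0])) if j not in bad_cols]
--     return [rows, cols]
-- ===== Notes on version B (the rewrite author's own statement) =====
-- stated objective: alternative
-- what changed: Replaces A's two scanning passes (per-row scan, then a re-scanning column-by-column pass over the whole board) with one cell-marking pass collecting bad row/column index sets, followed by complements over range(len(board)) and range(len(board[0])).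
-- outside the precondition, e.g. on findPassableLanes([['+', '+'], ['x']]): A returns [[1], []], B returns [[1], []]
import Mathlib
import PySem

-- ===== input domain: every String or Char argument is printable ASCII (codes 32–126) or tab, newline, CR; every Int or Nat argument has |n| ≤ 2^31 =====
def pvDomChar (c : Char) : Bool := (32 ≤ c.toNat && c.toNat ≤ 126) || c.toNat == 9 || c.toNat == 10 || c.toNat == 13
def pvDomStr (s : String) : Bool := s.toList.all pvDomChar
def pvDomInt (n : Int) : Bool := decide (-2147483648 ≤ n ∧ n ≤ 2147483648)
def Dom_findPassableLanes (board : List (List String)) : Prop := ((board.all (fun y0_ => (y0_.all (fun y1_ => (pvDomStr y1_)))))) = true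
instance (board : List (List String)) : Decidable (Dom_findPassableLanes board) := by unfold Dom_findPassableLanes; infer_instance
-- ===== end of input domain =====

-- B replaces A's two scanning passes (rows, then a re-scanning column pass) with one cell-marking pass (bad row/col index sets) plus complements: an alternative decomposition with the same cost. Equivalence is about the return value; neither program mutates its argument.


-- ===== PORT A =====
-- inner row loop with break: "for val in board[row]: if val == '+': clear = False; break"
def pvRowClearA : List String → Bool
  | [] => true
  | v :: rest => if v == "+" then false else pvRowClearA rest

-- inner column loop with break: "for i in range(len(board)): if board[i][j] == '+': clear = False; break".
-- board[i][j] is PySem.List.pyGetD r j "" (total form of pyGet?; Pre_ keeps j in range for every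
-- row, so the none/IndexError case is excluded and the default "" is never the value compared).
def pvColClearA (j : Int) : List (List String) → Bool
  | [] => true
  | r :: rest => if PySem.List.pyGetD r j "" == "+" then false else pvColClearA j rest

def findPassableLanes (board : List (List String)) : List (List Int) :=
  let rows := (PySem.List.pyRange 0 (board.length : Int)).foldl
      (fun acc row => if pvRowClearA (PySem.List.pyGetD board row []) then acc ++ [row] else acc) []
  -- len(board[0]): board[0] is pyGetD board 0 [] (the IndexError on [] is excluded by Pre_)
  let cols := (PySem.List.pyRange 0 ((PySem.List.pyGetD board 0 []).length : Int)).foldl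
      (fun acc j => if pvColClearA j board then acc ++ [j] else acc) []
  [rows, cols]

-- ===== PORT B =====
-- body of B's nested marking loop: for (i, row), for (j, val): if val == '+': add i, add j
def pvMarkF : PySem.Set Int × PySem.Set Int → Int × List String → PySem.Set Int × PySem.Set Int :=
  fun s p =>
    (PySem.List.enumerate p.2).foldl
      (fun t q => if q.2 == "+" then (PySem.Set.add t.1 p.1, PySem.Set.add t.2 q.1) else t) s

def pvMark (board : List (List String)) : PySem.Set Int × PySem.Set Int :=
  (PySem.List.enumerate board).foldl pvMarkF (PySem.Set.empty, PySem.Set.empty)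

def findPassableLanes_alt (board : List (List String)) : List (List Int) :=
  let bad := pvMark board
  let rows := (PySem.List.pyRange 0 (board.length : Int)).filter
      (fun i => !(PySem.Set.contains bad.1 i))
  -- len(board[0]) as in A's port: pyGetD board 0 []
  let cols := (PySem.List.pyRange 0 ((PySem.List.pyGetD board 0 []).length : Int)).filter
      (fun j => !(PySem.Set.contains bad.2 j))
  [rows, cols]

-- ===== PRECONDITION & SPEC =====
-- Pre_ excludes the empty board (A raises IndexError on board[0]) and ragged boards with a row
-- shorter than the first row, where A's column scan raises IndexError except in the accidental
-- case that an earlier '+' in each such column masks the out-of-range access.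
def Pre_findPassableLanes (board : List (List String)) : Prop :=
  board ≠ [] ∧ ∀ r ∈ board, (board.headD []).length ≤ r.length
instance (board : List (List String)) : Decidable (Pre_findPassableLanes board) := by
  unfold Pre_findPassableLanes; infer_instance

def pvWitness_findPassableLanes : List (List String) := [[".", "+"], ["x", "."]]

def Spec_findPassableLanes (board : List (List String)) (out : List (List Int)) : Prop := out = findPassableLanes_alt board
instance (board : List (List String)) (out : List (List Int)) : Decidable (Spec_findPassableLanes board out) := by unfold Spec_findPassableLanes; infer_instance

-- ===== CLAIM (what is proved, stated in full; the proofs are below) =====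
def Claim_equal_findPassableLanes : Prop := ∀ (board : List (List String)), Dom_findPassableLanes board → Pre_findPassableLanes board → Spec_findPassableLanes board (findPassableLanes board)

-- ===== LEMMAS AND PROOFS =====

-- A's row scan with break is exactly '+' non-membership
lemma pvRowClearA_iff (r : List String) : pvRowClearA r = true ↔ "+" ∉ r := by
  induction r with
  | nil => simp [pvRowClearA]
  | cons v rest ih =>
    by_cases h : v = "+"
    · subst h; simp [pvRowClearA]
    · simp only [pvRowClearA, if_neg (by simp [h] : ¬ ((v == "+") = true)), ih, List.mem_cons]
      simp [h, eq_comm]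

-- A's column scan with break: no row reads '+' at index j
lemma pvColClearA_iff (j : Int) (b : List (List String)) :
    pvColClearA j b = true ↔ ∀ r ∈ b, PySem.List.pyGetD r j "" ≠ "+" := by
  induction b with
  | nil => simp [pvColClearA]
  | cons r rest ih =>
    by_cases h : PySem.List.pyGetD r j "" = "+" <;>
      simp [pvColClearA, h, ih]

-- reading a cell at a Nat index equals '+' iff the index is in range and the entry is '+'
lemma pyGetD_plus_iff (r : List String) (n : Nat) :
    PySem.List.pyGetD r (n : Int) "" = "+" ↔ ∃ h : n < r.length, r[n] = "+" := by
  rw [PySem.List.pyGetD_natCast]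
  by_cases hn : n < r.length
  · simp [List.getD_eq_getElem?_getD, hn]
  · simp [List.getD_eq_getElem?_getD, hn]

-- membership in B's inner marking fold
lemma pvMark_inner_mem (i : Int) (row : List String) (j0 : Int)
    (t : PySem.Set Int × PySem.Set Int) (x : Int) :
    (x ∈ ((PySem.List.enumerate row j0).foldl
        (fun t q => if q.2 == "+" then (PySem.Set.add t.1 i, PySem.Set.add t.2 q.1) else t) t).1 ↔
      x ∈ t.1 ∨ (x = i ∧ "+" ∈ row)) ∧
    (x ∈ ((PySem.List.enumerate row j0).foldl
        (fun t q => if q.2 == "+" then (PySem.Set.add t.1 i, PySem.Set.add t.2 q.1) else t) t).2 ↔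
      x ∈ t.2 ∨ ∃ q ∈ PySem.List.enumerate row j0, q.2 = "+" ∧ x = q.1) := by
  induction row generalizing j0 t with
  | nil => simp [PySem.List.enumerate_nil]
  | cons v rest ih =>
    rw [PySem.List.enumerate_cons]
    simp only [List.foldl_cons]
    by_cases h : v = "+"
    · subst h
      simp only [beq_self_eq_true, if_true]
      constructor
      · rw [(ih (j0+1) _).1]
        simp [PySem.Set.mem_add]; tauto
      · rw [(ih (j0+1) _).2]
        simp [PySem.Set.mem_add]; tauto
    · simp only [if_neg (by simp [h] : ¬ (((j0, v).2 == "+") = true))]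
      constructor
      · rw [(ih (j0+1) t).1]; simp [Ne.symm h]
      · rw [(ih (j0+1) t).2]; simp [h]

-- membership in B's outer marking fold
lemma pvMark_outer_mem (board : List (List String)) (i0 : Int)
    (s : PySem.Set Int × PySem.Set Int) (x : Int) :
    (x ∈ ((PySem.List.enumerate board i0).foldl pvMarkF s).1 ↔
      x ∈ s.1 ∨ ∃ p ∈ PySem.List.enumerate board i0, x = p.1 ∧ "+" ∈ p.2) ∧
    (x ∈ ((PySem.List.enumerate board i0).foldl pvMarkF s).2 ↔
      x ∈ s.2 ∨ ∃ p ∈ PySem.List.enumerate board i0,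
        ∃ q ∈ PySem.List.enumerate p.2 0, q.2 = "+" ∧ x = q.1) := by
  induction board generalizing i0 s with
  | nil => simp [PySem.List.enumerate_nil]
  | cons row rest ih =>
    rw [PySem.List.enumerate_cons]
    simp only [List.foldl_cons]
    have h1 := (pvMark_inner_mem i0 row 0 s x).1
    have h2 := (pvMark_inner_mem i0 row 0 s x).2
    constructor
    · rw [(ih (i0+1) _).1, pvMarkF]
      simp only [h1]
      simp; tauto
    · rw [(ih (i0+1) _).2, pvMarkF]
      simp only [h2]
      simp; tauto

-- x is a bad row index iff some row x of the board contains '+'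
lemma pvMark_fst_mem (board : List (List String)) (x : Int) :
    x ∈ (pvMark board).1 ↔ ∃ k : Nat, ∃ _ : k < board.length, x = (k : Int) ∧ "+" ∈ board[k] := by
  rw [pvMark, (pvMark_outer_mem board 0 _ x).1]
  simp [PySem.Set.empty, PySem.List.mem_enumerate_iff]

-- x is a bad column index iff some row reads '+' at position x
lemma pvMark_snd_mem (board : List (List String)) (x : Int) :
    x ∈ (pvMark board).2 ↔ ∃ k : Nat, ∃ _ : k < board.length,
      ∃ m : Nat, ∃ _ : m < board[k].length, board[k][m] = "+" ∧ x = (m : Int) := by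
  rw [pvMark, (pvMark_outer_mem board 0 _ x).2]
  simp [PySem.Set.empty, PySem.List.mem_enumerate_iff]

-- the ports agree on every input (outside Pre_ both read missing cells as the harmless default)
lemma ports_eq (board : List (List String)) :
    findPassableLanes board = findPassableLanes_alt board := by
  rw [findPassableLanes, findPassableLanes_alt]
  rw [PySem.List.foldl_append_if_eq_filter, PySem.List.foldl_append_if_eq_filter]
  simp only [List.nil_append]
  refine congrArg₂ (fun a b => [a, b]) ?_ ?_
  · refine List.filter_congr (fun x hx => ?_)
    obtain ⟨hx0, hxlt⟩ := PySem.List.mem_pyRange_one.mp hx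
    obtain ⟨n, rfl⟩ := Int.eq_ofNat_of_zero_le hx0
    have hn : n < board.length := by exact_mod_cast hxlt
    rw [PySem.List.pyGetD_natCast]
    by_cases hm : ((n : Int)) ∈ (pvMark board).1
    · have : "+" ∈ board[n] := by
        rcases (pvMark_fst_mem board n).mp hm with ⟨k, hk, hxk, hplus⟩
        have : n = k := by exact_mod_cast hxk
        subst this; exact hplus
      have hf : pvRowClearA board[n] = false := by
        cases hcl : pvRowClearA board[n] with
        | false => rfl
        | true => exact absurd this ((pvRowClearA_iff _).mp hcl)
      simp [PySem.Set.contains, hm,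
        List.getD_eq_getElem?_getD, List.getElem?_eq_getElem hn, hf]
    · have : "+" ∉ board[n] := fun hplus =>
        hm ((pvMark_fst_mem board n).mpr ⟨n, hn, rfl, hplus⟩)
      simp [PySem.Set.contains, hm, pvRowClearA_iff,
        List.getD_eq_getElem?_getD, List.getElem?_eq_getElem hn, this]
  · refine List.filter_congr (fun x hx => ?_)
    obtain ⟨hx0, _⟩ := PySem.List.mem_pyRange_one.mp hx
    obtain ⟨n, rfl⟩ := Int.eq_ofNat_of_zero_le hx0
    by_cases hm : ((n : Int)) ∈ (pvMark board).2
    · have : ¬ pvColClearA (n : Int) board = true := by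
        rw [pvColClearA_iff]
        rcases (pvMark_snd_mem board n).mp hm with ⟨k, hk, m, hmlt, hplus, hxm⟩
        have hnm : n = m := by exact_mod_cast hxm
        subst hnm
        intro hall
        exact hall board[k] (List.getElem_mem hk) ((pyGetD_plus_iff _ n).mpr ⟨hmlt, hplus⟩)
      simp [PySem.Set.contains, hm, this]
    · have : pvColClearA (n : Int) board = true := by
        rw [pvColClearA_iff]
        intro r hr hplus
        rcases (pyGetD_plus_iff r n).mp hplus with ⟨hlt, hpl⟩
        rcases List.getElem_of_mem hr with ⟨k, hk, rfl⟩
        exact hm ((pvMark_snd_mem board n).mpr ⟨k, hk, n, hlt, hpl, rfl⟩)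
      simp [PySem.Set.contains, hm, this]

-- ===== VERDICT (by name: the statement is the Claim_ definition above) =====
theorem findPassableLanes_spec : Claim_equal_findPassableLanes := by
  intro board _ _
  unfold Spec_findPassableLanes
  exact ports_eq board
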